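-- pv_equiv track=rewrite | github.com/YooGunWook/coding_test | 탐욕법/조이스틱.py | count_alpha
-- ===== SOURCE A (Python) =====
-- import string
--
-- def count_alpha(alpha):
--     up = 0
--     down = 0
--     alpha_list = list(string.ascii_uppercase)[1:]
--     alpha_list_reverse = alpha_list[::-1]
--
--     if alpha == 'A':
--         return up
--
--     for alpha_up in alpha_list:
--         if alpha != alpha_up:
--             up += 1
--
--         if alpha == alpha_up:
--             up += 1
--             break
--
--     for alpha_down in alpha_list_reverse:
--         if alpha != alpha_down:
--             down += 1
--
--         if alpha == alpha_down:
--             down += 1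
--             break
--
--     if up == down:
--         return up
--
--     if up > down:
--         return down
--
--     if up < down:
--         return up
-- ===== SOURCE B (Python) =====
-- import string
--
-- def count_alpha(alpha):
--     for i, ch in enumerate(string.ascii_uppercase):
--         if alpha == ch:
--             return min(i, 26 - i)
--     return 25
-- ===== Notes on version B (the rewrite author's own statement) =====
-- stated objective: simpler
-- what changed: Replaces the two separate 25-step up/down counting loops over B..Z (plus the reversed copy and the three-way comparison) with a single enumerate scan of the alphabet returning the closed form min(i, 26 - i) at the first match, 25 on fallthrough.
import Mathlib
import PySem

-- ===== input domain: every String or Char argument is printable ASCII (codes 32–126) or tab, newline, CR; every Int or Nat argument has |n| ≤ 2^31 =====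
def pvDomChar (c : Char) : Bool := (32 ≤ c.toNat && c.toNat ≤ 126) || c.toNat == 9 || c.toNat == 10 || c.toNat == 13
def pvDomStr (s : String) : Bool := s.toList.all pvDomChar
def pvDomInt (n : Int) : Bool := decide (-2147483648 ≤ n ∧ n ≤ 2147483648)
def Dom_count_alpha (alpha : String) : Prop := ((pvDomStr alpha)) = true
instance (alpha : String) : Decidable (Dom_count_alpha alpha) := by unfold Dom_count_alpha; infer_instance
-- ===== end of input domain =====

-- B changes A's two 25-step counting loops into one enumerate scan with the closed form min(i, 26-i); simpler, same values everywhere.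

-- shared constant: list(string.ascii_uppercase) — the 26 one-letter strings
def pvUpper : List String :=
  ["A","B","C","D","E","F","G","H","I","J","K","L","M",
   "N","O","P","Q","R","S","T","U","V","W","X","Y","Z"]

-- ===== PORT A =====
-- the 'for alpha_up in …: if alpha != alpha_up: up += 1; if alpha == alpha_up: up += 1; break' loop
def pvLoopA (alpha : String) : List String → Int → Int
  | [], acc => acc
  | a :: rest, acc =>
      let acc := if alpha ≠ a then acc + 1 else acc
      if alpha = a then acc + 1 else pvLoopA alpha rest acc

def count_alpha (alpha : String) : Int :=
  let up : Int := 0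
  let down : Int := 0
  let alpha_list := PySem.List.slice pvUpper (some 1) none
  let alpha_list_reverse := (PySem.List.slice? alpha_list none none (-1)).getD []
  if alpha = "A" then up
  else
    let up := pvLoopA alpha alpha_list up
    let down := pvLoopA alpha alpha_list_reverse down
    if up = down then up
    else if up > down then down
    else up

-- ===== PORT B =====
-- 'for i, ch in enumerate(string.ascii_uppercase): if alpha == ch: return min(i, 26 - i)' / fallthrough 25
def pvLoopB (alpha : String) : List (Int × String) → Int
  | [] => 25
  | (i, ch) :: rest => if alpha = ch then min i (26 - i) else pvLoopB alpha rest

def count_alpha_alt (alpha : String) : Int :=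
  pvLoopB alpha (PySem.List.enumerate pvUpper 0)

-- ===== PRECONDITION & SPEC =====
def Spec_count_alpha (alpha : String) (out : Int) : Prop := out = count_alpha_alt alpha
instance (alpha : String) (out : Int) : Decidable (Spec_count_alpha alpha out) := by unfold Spec_count_alpha; infer_instance

-- ===== CLAIM (what is proved, stated in full; the proofs are below) =====
def Claim_equal_count_alpha : Prop := ∀ (alpha : String), Dom_count_alpha alpha → Spec_count_alpha alpha (count_alpha alpha)

-- ===== LEMMAS AND PROOFS =====

theorem pvLoopA_notmem (alpha : String) (l : List String) (acc : Int)
    (h : alpha ∉ l) : pvLoopA alpha l acc = acc + l.length := by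
  induction l generalizing acc with
  | nil => simp [pvLoopA]
  | cons a rest ih =>
      have h1 : alpha ≠ a := fun hh => h (hh ▸ List.mem_cons_self)
      have h2 : alpha ∉ rest := fun hh => h (List.mem_cons_of_mem _ hh)
      simp only [pvLoopA, if_pos h1, if_neg h1]
      rw [ih _ h2]
      simp [List.length_cons]
      ring

theorem pvLoopB_notmem (alpha : String) (es : List (Int × String))
    (h : ∀ p ∈ es, alpha ≠ p.2) : pvLoopB alpha es = 25 := by
  induction es with
  | nil => rfl
  | cons p rest ih =>
      obtain ⟨i, ch⟩ := p
      have h1 : alpha ≠ ch := h _ List.mem_cons_self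
      simp only [pvLoopB, if_neg h1]
      exact ih fun q hq => h q (List.mem_cons_of_mem _ hq)

theorem count_alpha_notmem (alpha : String) (h : alpha ∉ pvUpper) :
    count_alpha alpha = 25 := by
  have hA : alpha ≠ "A" := fun hh => h (hh ▸ (by decide : "A" ∈ pvUpper))
  have htail : alpha ∉ pvUpper.tail := fun hh => h (List.mem_of_mem_tail hh)
  have hrev : alpha ∉ pvUpper.tail.reverse := by simpa using htail
  simp only [count_alpha, PySem.List.slice_from_one, PySem.List.slice?_none_none_neg_one,
    Option.getD_some, if_neg hA,
    pvLoopA_notmem _ _ _ htail, pvLoopA_notmem _ _ _ hrev]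
  simp [pvUpper]

theorem count_alpha_alt_notmem (alpha : String) (h : alpha ∉ pvUpper) :
    count_alpha_alt alpha = 25 := by
  unfold count_alpha_alt
  apply pvLoopB_notmem
  intro p hp
  rw [PySem.List.mem_enumerate_iff] at hp
  obtain ⟨k, hk, rfl⟩ := hp
  exact fun hh => h (hh ▸ List.getElem_mem hk)

-- ===== VERDICT (by name: the statement is the Claim_ definition above) =====
theorem count_alpha_spec : Claim_equal_count_alpha := by
  intro alpha _
  unfold Spec_count_alpha
  by_cases h : alpha ∈ pvUpper
  · simp only [pvUpper, List.mem_cons, List.not_mem_nil, or_false] at h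
    rcases h with rfl|rfl|rfl|rfl|rfl|rfl|rfl|rfl|rfl|rfl|rfl|rfl|rfl|rfl|rfl|rfl|rfl|rfl|rfl|rfl|rfl|rfl|rfl|rfl|rfl|rfl <;> decide
  · rw [count_alpha_notmem _ h, count_alpha_alt_notmem _ h]
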